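-- pv_equiv track=rewrite | github.com/Tina2004007/FDS-DongRabbaniSolazzo | model_submission_3.py | extract_moves
-- ===== SOURCE A (Python) =====
-- def extract_moves(data: dict):
--     """
--     Extracts the set of moves used by each player during the battle.
--
--     This function iterates through the battle timeline, recording all moves used by each Pokémon.
--     If a Pokémon faints, its move records are removed, as fainted Pokémon
--     should not be included in the final feature calculation.
--
--     Args:
--         data (dict): Battle data dictionary, must contain "battle_timeline" key.
--
--     Returns:
--         p1_pokemon_moves (dict): Player 1's Pokémon moves dictionary
--             Format: {pokemon_name: [move_details_1, move_details_2, ...]}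
--         p2_pokemon_moves (dict): Player 2's Pokémon moves dictionary
--     """
--     p1_pokemon_moves = {}
--     p2_pokemon_moves = {}
--
--     for turn in data.get("battle_timeline", []):
--         p1_name = turn.get("p1_pokemon_state", {}).get("name", "")
--         p2_name = turn.get("p2_pokemon_state", {}).get("name", "")
--
--         p1_move = turn.get("p1_move_details")
--         if p1_move is not None and (p1_name not in p1_pokemon_moves or p1_move not in p1_pokemon_moves[p1_name]):
--             p1_pokemon_moves.setdefault(p1_name, []).append(p1_move)
--
--         p2_move = turn.get("p2_move_details")
--         if p2_move is not None and (p2_name not in p2_pokemon_moves or p2_move not in p2_pokemon_moves[p2_name]):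
--             p2_pokemon_moves.setdefault(p2_name, []).append(p2_move)
--
--         p1_status = turn.get("p1_pokemon_state", {}).get("status", "")
--         if p1_status == "fnt":
--             p1_pokemon_moves.pop(p1_name, None)
--
--         p2_status = turn.get("p2_pokemon_state", {}).get("status", "")
--         if p2_status == "fnt":
--             p2_pokemon_moves.pop(p2_name, None)
--
--     return p1_pokemon_moves, p2_pokemon_moves
-- ===== SOURCE B (Python) =====
-- def extract_moves(data: dict):
--     """Two-pass re-implementation: first record each Pokemon's last faint turn
--     index, then collect deduplicated moves from turns strictly after it."""
--     timeline = data.get("battle_timeline", [])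
--     return (_side_moves(timeline, "p1_pokemon_state", "p1_move_details"),
--             _side_moves(timeline, "p2_pokemon_state", "p2_move_details"))
--
--
-- def _side_moves(timeline, state_key, move_key):
--     last_faint = {}
--     for i, turn in enumerate(timeline):
--         state = turn.get(state_key, {})
--         if state.get("status", "") == "fnt":
--             last_faint[state.get("name", "")] = i
--
--     moves = {}
--     for i, turn in enumerate(timeline):
--         mv = turn.get(move_key)
--         if mv is None:
--             continue
--         name = turn.get(state_key, {}).get("name", "")
--         if last_faint.get(name, -1) < i:
--             lst = moves.get(name, [])
--             if mv not in lst: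
--                 moves[name] = lst + [mv]
--     return moves
-- ===== Notes on version B (the rewrite author's own statement) =====
-- stated objective: alternative
-- what changed: Replaces the interleaved append-then-pop-on-faint dict simulation with two independent passes per player: one pass builds a last-faint-turn index per Pokemon name, a second pass collects deduplicated moves only from turns strictly after that index.
import Mathlib
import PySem

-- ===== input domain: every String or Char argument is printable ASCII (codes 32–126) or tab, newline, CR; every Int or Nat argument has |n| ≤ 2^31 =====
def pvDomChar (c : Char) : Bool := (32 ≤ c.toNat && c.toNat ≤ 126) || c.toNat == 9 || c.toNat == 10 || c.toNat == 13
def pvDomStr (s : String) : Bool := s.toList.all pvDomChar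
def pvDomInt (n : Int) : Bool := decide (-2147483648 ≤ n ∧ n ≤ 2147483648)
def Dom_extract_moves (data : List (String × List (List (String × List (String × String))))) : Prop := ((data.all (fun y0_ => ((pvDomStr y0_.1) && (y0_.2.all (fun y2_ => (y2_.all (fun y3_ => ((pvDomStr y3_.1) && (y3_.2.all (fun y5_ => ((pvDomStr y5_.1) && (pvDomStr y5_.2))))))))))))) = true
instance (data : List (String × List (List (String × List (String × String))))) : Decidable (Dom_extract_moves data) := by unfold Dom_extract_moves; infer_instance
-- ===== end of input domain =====

-- B replaces A's append-then-pop-on-faint dict simulation by a per-player last-faint index pass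
-- followed by a filtered collection pass (objective: alternative decomposition; return value only).

-- shared field accessors (turn.get(state_key, {}).get("name"/"status", "") and turn.get(move_key))
def pvStName (sk : String) (t : List (String × List (String × String))) : String :=
  PySem.Dict.getD (PySem.Dict.mk (PySem.Dict.getD (PySem.Dict.mk t) sk [])) "name" ""
def pvStFnt (sk : String) (t : List (String × List (String × String))) : Bool :=
  PySem.Dict.getD (PySem.Dict.mk (PySem.Dict.getD (PySem.Dict.mk t) sk [])) "status" "" == "fnt"
def pvMvOf (mk : String) (t : List (String × List (String × String))) : Option (List (String × String)) :=
  PySem.Dict.get? (PySem.Dict.mk t) mk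

-- ===== PORT A =====
-- if move is not None and (name not in d or move not in d[name]): d.setdefault(name, []).append(move)
def pvAMove (d : PySem.Dict String (List (List (String × String)))) (nm : String)
    (mv? : Option (List (String × String))) : PySem.Dict String (List (List (String × String))) :=
  match mv? with
  | none => d
  | some mv =>
    if !(d.contains nm) || !((d.getD nm []).contains mv) then d.modify nm [] (· ++ [mv]) else d

-- if status == "fnt": d.pop(name, None)
def pvAFaint (d : PySem.Dict String (List (List (String × String)))) (nm : String) (f : Bool) :
    PySem.Dict String (List (List (String × String))) :=
  if f then d.erase nm else d

def extract_moves (data : List (String × List (List (String × List (String × String))))) : (List (String × List (List (String × String)))) × (List (String × List (List (String × String)))) :=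
  let tl := PySem.Dict.getD (PySem.Dict.mk data) "battle_timeline" []
  let r := tl.foldl (fun st t =>
      let s1 := pvAMove st.1 (pvStName "p1_pokemon_state" t) (pvMvOf "p1_move_details" t)
      let s2 := pvAMove st.2 (pvStName "p2_pokemon_state" t) (pvMvOf "p2_move_details" t)
      let s1 := pvAFaint s1 (pvStName "p1_pokemon_state" t) (pvStFnt "p1_pokemon_state" t)
      let s2 := pvAFaint s2 (pvStName "p2_pokemon_state" t) (pvStFnt "p2_pokemon_state" t)
      (s1, s2))
    (PySem.Dict.empty, PySem.Dict.empty)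
  (r.1.items, r.2.items)

-- ===== PORT B =====
-- pass 1: last_faint[name] = highest turn index with status == "fnt"
def pvLastFaints (sk : String) (tl : List (List (String × List (String × String)))) :
    PySem.Dict String Int :=
  (PySem.List.enumerate tl).foldl
    (fun lf p => if pvStFnt sk p.2 then lf.insert (pvStName sk p.2) p.1 else lf) PySem.Dict.empty

-- pass 2: collect moves with index strictly after the last faint, dedup in first-seen order
def pvCollectStep (sk mk : String) (lf : PySem.Dict String Int)
    (acc : PySem.Dict String (List (List (String × String))))
    (p : Int × List (String × List (String × String))) :
    PySem.Dict String (List (List (String × String))) :=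
  match pvMvOf mk p.2 with
  | none => acc
  | some mv =>
    if PySem.Dict.getD lf (pvStName sk p.2) (-1) < p.1 then
      if (acc.getD (pvStName sk p.2) []).contains mv then acc
      else acc.insert (pvStName sk p.2) (acc.getD (pvStName sk p.2) [] ++ [mv])
    else acc

def pvSideB (sk mk : String) (tl : List (List (String × List (String × String)))) :
    PySem.Dict String (List (List (String × String))) :=
  (PySem.List.enumerate tl).foldl (pvCollectStep sk mk (pvLastFaints sk tl)) PySem.Dict.empty

def extract_moves_alt (data : List (String × List (List (String × List (String × String))))) : (List (String × List (List (String × String)))) × (List (String × List (List (String × String)))) :=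
  let tl := PySem.Dict.getD (PySem.Dict.mk data) "battle_timeline" []
  ((pvSideB "p1_pokemon_state" "p1_move_details" tl).items,
   (pvSideB "p2_pokemon_state" "p2_move_details" tl).items)

-- ===== PRECONDITION & SPEC =====
def Spec_extract_moves (data : List (String × List (List (String × List (String × String))))) (out : (List (String × List (List (String × String)))) × (List (String × List (List (String × String))))) : Prop := out = extract_moves_alt data
instance (data : List (String × List (List (String × List (String × String))))) (out : (List (String × List (List (String × String)))) × (List (String × List (List (String × String))))) : Decidable (Spec_extract_moves data out) := by unfold Spec_extract_moves; exact instDecidableEqProd _ _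

-- ===== CLAIM (what is proved, stated in full; the proofs are below) =====
def Claim_equal_extract_moves : Prop := ∀ (data : List (String × List (List (String × List (String × String))))), Dom_extract_moves data → Spec_extract_moves data (extract_moves data)

-- ===== LEMMAS AND PROOFS =====

-- A's per-side step (the p1- resp. p2-component of A's loop body)
def pvASide (sk mk : String) (d : PySem.Dict String (List (List (String × String))))
    (t : List (String × List (String × String))) :
    PySem.Dict String (List (List (String × String))) :=
  pvAFaint (pvAMove d (pvStName sk t) (pvMvOf mk t)) (pvStName sk t) (pvStFnt sk t)

-- A's paired fold splits into two independent per-side folds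
theorem pvPairSplit (tl : List (List (String × List (String × String))))
    (s : PySem.Dict String (List (List (String × String))) × PySem.Dict String (List (List (String × String)))) :
    tl.foldl (fun st t =>
      let s1 := pvAMove st.1 (pvStName "p1_pokemon_state" t) (pvMvOf "p1_move_details" t)
      let s2 := pvAMove st.2 (pvStName "p2_pokemon_state" t) (pvMvOf "p2_move_details" t)
      let s1 := pvAFaint s1 (pvStName "p1_pokemon_state" t) (pvStFnt "p1_pokemon_state" t)
      let s2 := pvAFaint s2 (pvStName "p2_pokemon_state" t) (pvStFnt "p2_pokemon_state" t)
      (s1, s2)) s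
    = (tl.foldl (pvASide "p1_pokemon_state" "p1_move_details") s.1,
       tl.foldl (pvASide "p2_pokemon_state" "p2_move_details") s.2) := by
  induction tl generalizing s with
  | nil => rfl
  | cons t ts ih => simp [List.foldl, ih, pvASide]

-- dict facts about erase (erase removes every entry with the key; general, not in the PySem book)
theorem findFilter {ν : Type} (k m : String) (h : m ≠ k) (l : List (String × ν)) :
    List.find? (fun p => p.1 == m) (List.filter (fun p => !(p.1 == k)) l)
      = List.find? (fun p => p.1 == m) l := by
  induction l with
  | nil => rfl
  | cons p l ih =>
    cases hpk : (p.1 == k) with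
    | true =>
      have hpm : (p.1 == m) = false := by
        have := beq_iff_eq.mp hpk
        exact beq_eq_false_iff_ne.mpr (fun e => h (by rw [← e, this]))
      simp [List.filter_cons, hpk, hpm, ih]
    | false =>
      cases hpm : (p.1 == m) with
      | true => simp [List.filter_cons, hpk, hpm]
      | false => simp [List.filter_cons, hpk, hpm, ih]

theorem anyFilter {ν : Type} (k m : String) (h : m ≠ k) (l : List (String × ν)) :
    List.any (List.filter (fun p => !(p.1 == k)) l) (fun p => p.1 == m)
      = List.any l (fun p => p.1 == m) := by
  induction l with
  | nil => rfl
  | cons p l ih =>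
    cases hpk : (p.1 == k) with
    | true =>
      have hpm : (p.1 == m) = false := by
        have := beq_iff_eq.mp hpk
        exact beq_eq_false_iff_ne.mpr (fun e => h (by rw [← e, this]))
      simp [hpk, hpm, ih]
    | false =>
      simp [hpk, ih]

theorem filterMapSelf {ν : Type} (k : String) (v : ν) (l : List (String × ν)) :
    List.filter (fun p => !(p.1 == k)) (List.map (fun p => if p.1 == k then (k, v) else p) l)
      = List.filter (fun p => !(p.1 == k)) l := by
  induction l with
  | nil => rfl
  | cons p l ih =>
    by_cases hpk : p.1 = k
    · simpa [hpk] using ih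
    · simpa [hpk] using ih

theorem filterMapComm {ν : Type} (k m : String) (v : ν) (h : m ≠ k) (l : List (String × ν)) :
    List.filter (fun p => !(p.1 == k)) (List.map (fun p => if p.1 == m then (m, v) else p) l)
      = List.map (fun p => if p.1 == m then (m, v) else p) (List.filter (fun p => !(p.1 == k)) l) := by
  have hmk : (m == k) = false := beq_eq_false_iff_ne.mpr h
  induction l with
  | nil => rfl
  | cons p l ih =>
    by_cases hpm : p.1 = m
    · have hpk : ¬ p.1 = k := fun e => h (by rw [← e, hpm])
      simpa [hpm, hpk, h] using ih
    · by_cases hpk : p.1 = k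
      · simpa [hpm, hpk, Ne.symm h] using ih
      · simpa [hpm, hpk] using ih

theorem pvGetDEraseNe {ν : Type} (d : PySem.Dict String ν) {k m : String} (d0 : ν) (h : m ≠ k) :
    (d.erase k).getD m d0 = d.getD m d0 := by
  simp only [PySem.Dict.getD, PySem.Dict.get?, PySem.Dict.erase, findFilter k m h]

theorem pvContainsEraseNe {ν : Type} (d : PySem.Dict String ν) {k m : String} (h : m ≠ k) :
    (d.erase k).contains m = d.contains m := by
  simp only [PySem.Dict.contains, PySem.Dict.erase]
  exact anyFilter k m h d.items

theorem pvEraseInsertSelf {ν : Type} (d : PySem.Dict String ν) (k : String) (v : ν) :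
    (d.insert k v).erase k = d.erase k := by
  by_cases hc : d.contains k = true
  · simp only [PySem.Dict.insert, hc, if_true, PySem.Dict.erase, filterMapSelf]
  · simp only [PySem.Dict.insert, hc, if_false, PySem.Dict.erase, List.filter_append]
    simp
  
theorem pvEraseInsertNe {ν : Type} (d : PySem.Dict String ν) {k m : String} (v : ν) (h : m ≠ k) :
    (d.insert m v).erase k = (d.erase k).insert m v := by
  have hmk : (m == k) = false := beq_eq_false_iff_ne.mpr h
  by_cases hc : d.contains m = true
  · have hc' : (d.erase k).contains m = true := by rw [pvContainsEraseNe _ h]; exact hc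
    have hr : (d.erase k).insert m v
        = ⟨(d.erase k).items.map (fun p => if p.1 == m then (m, v) else p)⟩ := by
      simp only [PySem.Dict.insert, hc', if_true]
    rw [hr]
    simp only [PySem.Dict.insert, hc, if_true, PySem.Dict.erase]
    exact congrArg PySem.Dict.mk (filterMapComm k m v h d.items)
  · have hc' : (d.erase k).contains m = false := by rw [pvContainsEraseNe _ h]; simpa using hc
    have hr : (d.erase k).insert m v = ⟨(d.erase k).items ++ [(m, v)]⟩ := by
      simp only [PySem.Dict.insert, hc', Bool.false_eq_true, if_false]
    rw [hr]
    simp only [PySem.Dict.insert, hc, if_false, PySem.Dict.erase, List.filter_append]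
    exact congrArg PySem.Dict.mk (by simp [hmk])

-- last-faint indices recorded from 'enumerate tl' are < tl.length
theorem pvLastFaintsAux (N : Int) (sk : String)
    (l : List (Int × List (String × List (String × String)))) (lf0 : PySem.Dict String Int)
    (h0 : ∀ nm, PySem.Dict.getD lf0 nm (-1) < N) (hl : ∀ p ∈ l, p.1 < N) (nm : String) :
    PySem.Dict.getD
      (l.foldl (fun lf p => if pvStFnt sk p.2 then lf.insert (pvStName sk p.2) p.1 else lf) lf0)
      nm (-1) < N := by
  induction l generalizing lf0 with
  | nil => exact h0 nm
  | cons p l ih =>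
    refine ih _ ?_ (fun q hq => hl q (List.mem_cons_of_mem _ hq))
    intro nm'
    by_cases hf : pvStFnt sk p.2 = true
    · simp only [hf, if_true]
      by_cases he : nm' = pvStName sk p.2
      · rw [he, PySem.Dict.getD_insert_self]
        exact hl p (List.mem_cons_self ..)
      · rw [PySem.Dict.getD_insert_of_ne _ _ _ he]
        exact h0 nm'
    · simp only [hf, if_false]
      exact h0 nm'

theorem pvLastFaintsLt (sk : String) (tl : List (List (String × List (String × String)))) (nm : String) :
    PySem.Dict.getD (pvLastFaints sk tl) nm (-1) < (tl.length : Int) := by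
  refine pvLastFaintsAux _ _ _ _ (fun _ => by simp [PySem.Dict.getD_empty]; omega) ?_ nm
  intro p hp
  rcases (PySem.List.mem_enumerate_iff _ _ _).mp hp with ⟨j, hj, rfl⟩
  simpa using (by exact_mod_cast hj : (j : Int) < tl.length)

-- pvAMove in insert form
theorem pvMoveEq (d : PySem.Dict String (List (List (String × String)))) (nm : String)
    (mv : List (String × String)) :
    pvAMove d nm (some mv)
      = (if (d.getD nm []).contains mv then d else d.insert nm (d.getD nm [] ++ [mv])) := by
  by_cases hc : d.contains nm = true
  · simp [pvAMove, PySem.Dict.modify, hc]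
  · have hd : d.getD nm [] = [] := PySem.Dict.getD_of_not_contains d [] (by simpa using hc)
    simp [pvAMove, PySem.Dict.modify, hc, hd]

-- erasing the moved name undoes the move phase
theorem pvEraseMove (d : PySem.Dict String (List (List (String × String)))) (nm : String)
    (mv? : Option (List (String × String))) :
    (pvAMove d nm mv?).erase nm = d.erase nm := by
  cases mv? with
  | none => rfl
  | some mv =>
    rw [pvMoveEq]
    by_cases hmem : (d.getD nm []).contains mv = true
    · rw [if_pos hmem]
    · rw [if_neg hmem, pvEraseInsertSelf]

-- unfolding equations for pvCollectStep on a pair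
theorem pvCollectStep_none (sk mk : String) (lf : PySem.Dict String Int)
    (acc : PySem.Dict String (List (List (String × String)))) (i : Int)
    (t : List (String × List (String × String))) (h : pvMvOf mk t = none) :
    pvCollectStep sk mk lf acc (i, t) = acc := by
  simp [pvCollectStep, h]

theorem pvCollectStep_some (sk mk : String) (lf : PySem.Dict String Int)
    (acc : PySem.Dict String (List (List (String × String)))) (i : Int)
    (t : List (String × List (String × String))) (mv : List (String × String))
    (h : pvMvOf mk t = some mv) :
    pvCollectStep sk mk lf acc (i, t)
      = (if PySem.Dict.getD lf (pvStName sk t) (-1) < i then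
          (if (acc.getD (pvStName sk t) []).contains mv then acc
           else acc.insert (pvStName sk t) (acc.getD (pvStName sk t) [] ++ [mv]))
         else acc) := by
  simp [pvCollectStep, h]

-- the collection pass with name n blocked on every index equals erasing n afterwards
theorem pvBlocked (sk mk n : String) (lf lf' : PySem.Dict String Int)
    (h1 : ∀ m, m ≠ n → PySem.Dict.getD lf' m (-1) = PySem.Dict.getD lf m (-1))
    (l : List (Int × List (String × List (String × String))))
    (h2 : ∀ p ∈ l, ¬ (PySem.Dict.getD lf' n (-1) < p.1))
    (d : PySem.Dict String (List (List (String × String)))) :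
    l.foldl (pvCollectStep sk mk lf') (d.erase n)
      = (l.foldl (pvCollectStep sk mk lf) d).erase n := by
  induction l generalizing d with
  | nil => rfl
  | cons p l ih =>
    have h2p := h2 p (List.mem_cons_self ..)
    have h2l : ∀ q ∈ l, ¬ (PySem.Dict.getD lf' n (-1) < q.1) :=
      fun q hq => h2 q (List.mem_cons_of_mem _ hq)
    simp only [List.foldl_cons]
    have hstep : pvCollectStep sk mk lf' (d.erase n) (p.1, p.2)
        = (pvCollectStep sk mk lf d (p.1, p.2)).erase n := by
      cases hmv : pvMvOf mk p.2 with
      | none => rw [pvCollectStep_none _ _ _ _ _ _ hmv, pvCollectStep_none _ _ _ _ _ _ hmv]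
      | some mv =>
        rw [pvCollectStep_some _ _ _ _ _ _ _ hmv, pvCollectStep_some _ _ _ _ _ _ _ hmv]
        by_cases hn : pvStName sk p.2 = n
        · rw [hn, if_neg h2p]
          split
          · split
            · rfl
            · rw [pvEraseInsertSelf]
          · rfl
        · rw [h1 _ hn, pvGetDEraseNe d [] hn]
          split
          · split
            · rfl
            · rw [pvEraseInsertNe _ _ hn]
          · rfl
    rw [show p = (p.1, p.2) from rfl, hstep, ih h2l]

-- per-side main lemma: A's interleaved fold equals B's two passes
theorem pvMain (sk mk : String) (tl : List (List (String × List (String × String)))) :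
    tl.foldl (pvASide sk mk) PySem.Dict.empty = pvSideB sk mk tl := by
  induction tl using List.reverseRecOn with
  | nil => rfl
  | append_singleton ts t ih =>
    have henum : PySem.List.enumerate (ts ++ [t]) 0
        = PySem.List.enumerate ts 0 ++ [((ts.length : Int), t)] := by
      rw [PySem.List.enumerate_append]
      simp [PySem.List.enumerate]
    have hbound : ∀ p ∈ PySem.List.enumerate ts 0, p.1 < (ts.length : Int) := by
      intro p hp
      rcases (PySem.List.mem_enumerate_iff _ _ _).mp hp with ⟨j, hj, rfl⟩
      simpa using (by exact_mod_cast hj : (j : Int) < ts.length)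
    rw [List.foldl_append]
    by_cases hf : pvStFnt sk t = true
    -- faint on the last turn: B blocks name everywhere, A erases it at the end
    · have hlf : pvLastFaints sk (ts ++ [t])
          = (pvLastFaints sk ts).insert (pvStName sk t) (ts.length : Int) := by
        unfold pvLastFaints
        rw [henum, List.foldl_append]
        simp [hf]
      have hlast : pvCollectStep sk mk (pvLastFaints sk (ts ++ [t]))
          (PySem.List.enumerate ts 0 |>.foldl (pvCollectStep sk mk (pvLastFaints sk (ts ++ [t]))) PySem.Dict.empty)
          ((ts.length : Int), t)
          = (PySem.List.enumerate ts 0 |>.foldl (pvCollectStep sk mk (pvLastFaints sk (ts ++ [t]))) PySem.Dict.empty) := by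
        cases hmv : pvMvOf mk t with
        | none => rw [pvCollectStep_none _ _ _ _ _ _ hmv]
        | some mv =>
          rw [pvCollectStep_some _ _ _ _ _ _ _ hmv, hlf, PySem.Dict.getD_insert_self]
          simp
      have hblocked : (PySem.List.enumerate ts 0).foldl
            (pvCollectStep sk mk (pvLastFaints sk (ts ++ [t]))) PySem.Dict.empty
          = ((PySem.List.enumerate ts 0).foldl
            (pvCollectStep sk mk (pvLastFaints sk ts)) PySem.Dict.empty).erase (pvStName sk t) := by
        have := pvBlocked sk mk (pvStName sk t) (pvLastFaints sk ts)
          (pvLastFaints sk (ts ++ [t]))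
          (fun m hm => by rw [hlf, PySem.Dict.getD_insert_of_ne _ _ _ hm])
          (PySem.List.enumerate ts 0)
          (fun p hp => by rw [hlf, PySem.Dict.getD_insert_self]; exact not_lt.mpr (le_of_lt (hbound p hp)))
          PySem.Dict.empty
        simpa using this
      unfold pvSideB
      rw [henum, List.foldl_append]
      simp only [List.foldl_cons, List.foldl_nil]
      rw [hlast, hblocked, ← pvSideB, ← ih]
      unfold pvASide
      rw [pvAFaint, if_pos hf, pvEraseMove]
    -- no faint on the last turn: both sides just run the move phase
    · have hlf : pvLastFaints sk (ts ++ [t]) = pvLastFaints sk ts := by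
        unfold pvLastFaints
        rw [henum, List.foldl_append]
        simp [hf]
      unfold pvSideB
      rw [henum, List.foldl_append, hlf]
      simp only [List.foldl_cons, List.foldl_nil]
      rw [← pvSideB, ← ih]
      unfold pvASide
      rw [pvAFaint, if_neg hf]
      cases hmv : pvMvOf mk t with
      | none => rw [pvCollectStep_none _ _ _ _ _ _ hmv]; rfl
      | some mv =>
        have hcond : PySem.Dict.getD (pvLastFaints sk ts) (pvStName sk t) (-1) < (ts.length : Int) :=
          pvLastFaintsLt sk ts _
        rw [pvMoveEq, pvCollectStep_some _ _ _ _ _ _ _ hmv, if_pos hcond]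

-- ===== VERDICT (by name: the statement is the Claim_ definition above) =====
theorem extract_moves_spec : Claim_equal_extract_moves := by
  intro data _
  show extract_moves data = extract_moves_alt data
  simp only [extract_moves, extract_moves_alt, pvPairSplit, pvMain]
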